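-- pv_equiv track=rewrite | github.com/pypi-ahmad/genai-systems-lab | shared/config.py | _project_env_key
-- ===== SOURCE A (Python) =====
-- def _normalize_project_name(project_name: str) -> str:
--     normalized = project_name.strip().lower().replace("_", "-").replace(" ", "-")
--     while "--" in normalized:
--         normalized = normalized.replace("--", "-")
--     return normalized
--
-- def _project_env_key(project_name: str) -> str:
--     normalized = _normalize_project_name(project_name)
--     characters: list[str] = []
--     for char in normalized:
--         if char.isalnum():
--             characters.append(char.upper())
--         else:
--             characters.append("_")
--     return "".join(characters)
-- ===== SOURCE B (Python) =====
-- def _project_env_key(project_name: str) -> str: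
--     out = []
--     prev_was_dash = False
--     for char in project_name.strip().lower():
--         if char in "_ -":
--             if not prev_was_dash:
--                 out.append("_")
--             prev_was_dash = True
--         elif char.isalnum():
--             out.append(char.upper())
--             prev_was_dash = False
--         else:
--             out.append("_")
--             prev_was_dash = False
--     return "".join(out)
-- ===== Notes on version B (the rewrite author's own statement) =====
-- stated objective: alternative
-- what changed: Replaced the normalize-then-map pipeline (strip/lower/two replaces plus a repeated whole-string '--'->'-' collapse loop, then a second mapping pass) by a single state-machine pass over the stripped lowered string carrying a prev_was_dash flag that collapses runs of {'_',' ','-'} on the fly.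
import Mathlib
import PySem

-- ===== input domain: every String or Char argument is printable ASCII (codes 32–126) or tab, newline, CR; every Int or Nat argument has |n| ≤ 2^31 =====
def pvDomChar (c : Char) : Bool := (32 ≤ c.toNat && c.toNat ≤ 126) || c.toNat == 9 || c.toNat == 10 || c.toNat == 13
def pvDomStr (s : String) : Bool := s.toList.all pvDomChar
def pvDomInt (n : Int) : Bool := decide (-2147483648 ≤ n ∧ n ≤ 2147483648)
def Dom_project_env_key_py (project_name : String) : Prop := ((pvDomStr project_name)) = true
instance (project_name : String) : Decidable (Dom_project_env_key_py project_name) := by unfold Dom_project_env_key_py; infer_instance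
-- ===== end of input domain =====

-- B replaces A's normalize-then-map two-pass pipeline (with its repeated '--'->'-' collapse loop)
-- by one state-machine pass carrying a prev_was_dash flag; proved to return the same string.

-- ===== PORT A =====
-- pvRepl2 and the lemmas up to pvReplace_dd_length_lt exist only to justify termination of the
-- 'while "--" in normalized' loop; the port itself is the literal pipeline below.
def pvRepl2 : List Char → List Char
  | [] => []
  | [c] => [c]
  | a :: b :: t => if a = '-' ∧ b = '-' then '-' :: pvRepl2 t else a :: pvRepl2 (b :: t)

def pvHasDD : List Char → Bool
  | [] => false
  | [_] => false
  | a :: b :: t => (a = '-' && b = '-') || pvHasDD (b :: t)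

theorem pv_go_dd (fuel : Nat) : ∀ (l acc : List Char), l.length ≤ fuel →
    PySem.Chars.replace.go ['-', '-'] ['-'] fuel l acc = acc.reverse ++ pvRepl2 l := by
  induction fuel with
  | zero =>
    intro l acc h
    have : l = [] := List.eq_nil_of_length_eq_zero (Nat.le_zero.mp h)
    subst this
    simp [PySem.Chars.replace.go, pvRepl2]
  | succ fuel ih =>
    intro l acc h
    match l with
    | [] => simp [PySem.Chars.replace.go, pvRepl2]
    | [c] =>
      have hpre : List.isPrefixOf ['-', '-'] [c] = false := by
        simp [List.isPrefixOf]
      simp only [PySem.Chars.replace.go, hpre, Bool.false_eq_true, if_false]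
      rw [ih [] (c :: acc) (by simp)]
      simp [pvRepl2]
    | a :: b :: t =>
      by_cases hd : a = '-' ∧ b = '-'
      · obtain ⟨ha, hb⟩ := hd; subst ha; subst hb
        have hpre : List.isPrefixOf ['-', '-'] ('-' :: '-' :: t) = true := by
          simp [List.isPrefixOf]
        simp only [PySem.Chars.replace.go, hpre, if_true, List.length_cons, List.length_nil,
          List.drop_succ_cons, List.drop_zero, List.reverse_cons, List.reverse_nil, List.nil_append,
          List.singleton_append]
        rw [ih t ('-' :: acc) (by simp at h ⊢; omega)]
        simp [pvRepl2]
      · have hpre : List.isPrefixOf ['-', '-'] (a :: b :: t) = false := by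
          simp [List.isPrefixOf]
          intro ha hb; exact hd ⟨ha.symm, hb.symm⟩
        simp only [PySem.Chars.replace.go, hpre, Bool.false_eq_true, if_false]
        rw [ih (b :: t) (a :: acc) (by simp at h ⊢; omega)]
        simp [pvRepl2, hd]

theorem pvChars_replace_dd (l : List Char) :
    PySem.Chars.replace l ['-', '-'] ['-'] = pvRepl2 l := by
  rw [PySem.Chars.replace]
  simp only [List.isEmpty, Bool.false_eq_true, if_false]
  exact pv_go_dd l.length l [] (le_refl _)

theorem pvRepl2_length_le (l : List Char) : (pvRepl2 l).length ≤ l.length := by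
  induction l using pvRepl2.induct with
  | case1 => simp [pvRepl2]
  | case2 c => simp [pvRepl2]
  | case3 a b t hd ih =>
    obtain ⟨ha, hb⟩ := hd; subst ha; subst hb
    simp [pvRepl2]; omega
  | case4 a b t hd ih => simp [pvRepl2, hd]; simp at ih; omega

theorem pvRepl2_length_lt (l : List Char) (h : pvHasDD l = true) :
    (pvRepl2 l).length < l.length := by
  induction l using pvRepl2.induct with
  | case1 => simp [pvHasDD] at h
  | case2 c => simp [pvHasDD] at h
  | case3 a b t hd ih =>
    obtain ⟨ha, hb⟩ := hd; subst ha; subst hb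
    have := pvRepl2_length_le t
    simp [pvRepl2]; omega
  | case4 a b t hd ih =>
    simp only [pvHasDD, Bool.or_eq_true, Bool.and_eq_true, decide_eq_true_eq] at h
    rcases h with ⟨ha, hb⟩ | h
    · exact absurd ⟨ha, hb⟩ hd
    · have := ih h
      simp [pvRepl2, hd]
      simp at this
      omega

theorem pvHasDD_iff (l : List Char) : pvHasDD l = true ↔ ['-', '-'] <:+: l := by
  induction l with
  | nil =>
    simp only [pvHasDD, Bool.false_eq_true, false_iff]
    intro h
    have := h.length_le
    simp at this
  | cons a t ih =>
    rw [List.infix_cons_iff]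
    cases t with
    | nil =>
      constructor
      · intro h; simp [pvHasDD] at h
      · rintro (h | h) <;> (have := h.length_le; simp at this)
    | cons b t' =>
      simp only [pvHasDD, Bool.or_eq_true, Bool.and_eq_true, decide_eq_true_eq, ih]
      constructor
      · rintro (⟨ha, hb⟩ | h)
        · exact Or.inl (by simp [ha, hb, List.cons_prefix_cons])
        · exact Or.inr h
      · rintro (h | h)
        · simp only [List.cons_prefix_cons] at h
          exact Or.inl ⟨h.1.symm, h.2.1.symm⟩
        · exact Or.inr h

theorem pvStr_replace_dd_toList (s : String) :
    (PySem.Str.replace s "--" "-").toList = pvRepl2 s.toList := by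
  rw [PySem.Str.toList_replace]
  rw [show ("--" : String).toList = ['-', '-'] from rfl,
      show ("-" : String).toList = ['-'] from rfl, pvChars_replace_dd]

theorem pvStr_isIn_dd (s : String) :
    PySem.Str.isIn "--" s = pvHasDD s.toList := by
  by_cases h : pvHasDD s.toList = true
  · rw [h]
    exact (PySem.Str.isIn_iff_infix _ _).mpr (by simpa using (pvHasDD_iff _).mp h)
  · simp only [Bool.not_eq_true] at h
    rw [h, ← Bool.not_eq_true]
    intro hc
    have := (PySem.Str.isIn_iff_infix _ _).mp hc
    have : pvHasDD s.toList = true := (pvHasDD_iff _).mpr (by simpa using this)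
    simp [h] at this

theorem pvReplace_dd_length_lt (s : String) (h : PySem.Str.isIn "--" s = true) :
    (PySem.Str.replace s "--" "-").length < s.length := by
  rw [← String.length_toList, ← String.length_toList (s := s), pvStr_replace_dd_toList]
  exact pvRepl2_length_lt _ (by rw [← pvStr_isIn_dd]; exact h)

-- the 'while "--" in normalized: normalized = normalized.replace("--", "-")' loop
def pvNormLoop (s : String) : String :=
  if h : PySem.Str.isIn "--" s = true then
    pvNormLoop (PySem.Str.replace s "--" "-")
  else s
termination_by s.length
decreasing_by exact pvReplace_dd_length_lt s h

def project_env_key_py (project_name : String) : String :=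
  let normalized :=
    pvNormLoop (PySem.Str.replace
      (PySem.Str.replace (PySem.Str.lower (PySem.Str.strip project_name)) "_" "-") " " "-")
  let characters : List String :=
    normalized.toList.map (fun char =>
      if PySem.Chars.isalnum char then String.ofList [PySem.Chars.upperChar char] else "_")
  PySem.Str.join "" characters

-- ===== PORT B =====
def pvFsm : List Char → Bool → List Char
  | [], _ => []
  | c :: t, prev =>
    if c = '_' ∨ c = ' ' ∨ c = '-' then
      (if prev then [] else ['_']) ++ pvFsm t true
    else if PySem.Chars.isalnum c then
      PySem.Chars.upperChar c :: pvFsm t false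
    else
      '_' :: pvFsm t false

def project_env_key_py_alt (project_name : String) : String :=
  String.ofList (pvFsm (PySem.Str.lower (PySem.Str.strip project_name)).toList false)

-- ===== PRECONDITION & SPEC =====
def Spec_project_env_key_py (project_name : String) (out : String) : Prop := out = project_env_key_py_alt project_name
instance (project_name : String) (out : String) : Decidable (Spec_project_env_key_py project_name out) := by unfold Spec_project_env_key_py; infer_instance

-- ===== CLAIM (what is proved, stated in full; the proofs are below) =====
def Claim_equal_project_env_key_py : Prop := ∀ (project_name : String), Dom_project_env_key_py project_name → Spec_project_env_key_py project_name (project_env_key_py project_name)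

-- ===== LEMMAS AND PROOFS =====

-- the per-char map of A's second pass
def pvF (c : Char) : Char := if PySem.Chars.isalnum c then PySem.Chars.upperChar c else '_'

-- the composition of A's two single-char replaces
def pvR (c : Char) : Char :=
  if (if c = '_' then '-' else c) = ' ' then '-' else if c = '_' then '-' else c

theorem pv_go_single (a b : Char) (fuel : Nat) : ∀ (l acc : List Char), l.length ≤ fuel →
    PySem.Chars.replace.go [a] [b] fuel l acc =
      acc.reverse ++ l.map (fun c => if c = a then b else c) := by
  induction fuel with
  | zero =>
    intro l acc h
    have : l = [] := List.eq_nil_of_length_eq_zero (Nat.le_zero.mp h)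
    subst this
    simp [PySem.Chars.replace.go]
  | succ fuel ih =>
    intro l acc h
    match l with
    | [] => simp [PySem.Chars.replace.go]
    | c :: t =>
      by_cases hc : c = a
      · subst hc
        have hpre : List.isPrefixOf [c] (c :: t) = true := by simp [List.isPrefixOf]
        simp only [PySem.Chars.replace.go, hpre, if_true, List.length_cons, List.length_nil,
          List.drop_succ_cons, List.drop_zero, List.reverse_cons, List.reverse_nil, List.nil_append,
          List.singleton_append]
        rw [ih t (b :: acc) (by simp at h ⊢; omega)]
        simp
      · have hpre : List.isPrefixOf [a] (c :: t) = false := by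
          simp [List.isPrefixOf]; exact fun hh => hc hh.symm
        simp only [PySem.Chars.replace.go, hpre, Bool.false_eq_true, if_false]
        rw [ih t (c :: acc) (by simp at h ⊢; omega)]
        simp [hc]

theorem pvChars_replace_single (a b : Char) (l : List Char) :
    PySem.Chars.replace l [a] [b] = l.map (fun c => if c = a then b else c) := by
  rw [PySem.Chars.replace]
  simp only [List.isEmpty, Bool.false_eq_true, if_false]
  exact pv_go_single a b l.length l [] (le_refl _)

-- pvFsm is invariant under the '--' -> '-' collapse pass
theorem pvFsm_repl2 (l : List Char) : ∀ prev, pvFsm (pvRepl2 l) prev = pvFsm l prev := by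
  induction l using pvRepl2.induct with
  | case1 => intro prev; simp [pvRepl2]
  | case2 c => intro prev; simp [pvRepl2]
  | case3 a b t hd ih =>
    intro prev
    obtain ⟨ha, hb⟩ := hd; subst ha; subst hb
    simp only [pvRepl2, if_true, and_self]
    simp [pvFsm, ih]
  | case4 a b t hd ih =>
    intro prev
    simp only [pvRepl2, hd, if_false]
    by_cases hdash : a = '_' ∨ a = ' ' ∨ a = '-'
    · simp [pvFsm, hdash, ih]
    · by_cases halnum : PySem.Chars.isalnum a = true
      · simp [pvFsm, hdash, halnum, ih]
      · simp [pvFsm, hdash, halnum, ih]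

theorem pvHasDD_cons (c : Char) (t : List Char) (h : pvHasDD (c :: t) = false) :
    pvHasDD t = false := by
  cases t with
  | nil => simp [pvHasDD]
  | cons b t' => simp [pvHasDD] at h ⊢; tauto

theorem pvMem_repl2 (c : Char) (l : List Char) (h : c ∈ pvRepl2 l) : c ∈ l := by
  induction l using pvRepl2.induct with
  | case1 => simpa [pvRepl2] using h
  | case2 d => simpa [pvRepl2] using h
  | case3 a b t hd ih =>
    obtain ⟨ha, hb⟩ := hd; subst ha; subst hb
    simp only [pvRepl2, if_true, and_self] at h
    rcases List.mem_cons.mp h with h | h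
    · simp [h]
    · exact List.mem_cons_of_mem _ (List.mem_cons_of_mem _ (ih h))
  | case4 a b t hd ih =>
    simp only [pvRepl2, hd, if_false] at h
    rcases List.mem_cons.mp h with h | h
    · simp [h]
    · exact List.mem_cons_of_mem _ (ih h)

-- on a string with no '--', no '_' and no ' ', the FSM is just the per-char map
theorem pvFsm_no_dd (l : List Char) : ∀ prev, pvHasDD l = false → '_' ∉ l → ' ' ∉ l →
    (prev = true → l.head? ≠ some '-') → pvFsm l prev = l.map pvF := by
  induction l with
  | nil => intro prev _ _ _ _; simp [pvFsm]
  | cons c t ih =>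
    intro prev hdd hu hs hp
    have hut : '_' ∉ t := fun h => hu (List.mem_cons_of_mem _ h)
    have hst : ' ' ∉ t := fun h => hs (List.mem_cons_of_mem _ h)
    have hddt : pvHasDD t = false := pvHasDD_cons c t hdd
    by_cases hdash : c = '_' ∨ c = ' ' ∨ c = '-'
    · have hc : c = '-' := by
        rcases hdash with h | h | h
        · exact absurd (h ▸ List.mem_cons_self) hu
        · exact absurd (h ▸ List.mem_cons_self) hs
        · exact h
      subst hc
      have hprev : prev = false := by
        cases prev with
        | false => rfl
        | true => exact absurd (by simp : (('-' :: t).head? = some '-')) (hp rfl)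
      subst hprev
      have hhead : t.head? ≠ some '-' := by
        cases t with
        | nil => simp
        | cons b t' =>
          have hb : ¬(b = '-') := by
            intro hb; subst hb
            simp [pvHasDD] at hdd
          simp only [List.head?_cons]
          exact fun h => hb (Option.some.inj h)
      simp only [pvFsm, if_pos (by simp : ('-' : Char) = '_' ∨ ('-' : Char) = ' ' ∨ ('-' : Char) = '-'),
        Bool.false_eq_true, if_false]
      rw [ih true hddt hut hst (fun _ => hhead)]
      have : pvF '-' = '_' := by decide
      simp [this]
    · by_cases halnum : PySem.Chars.isalnum c = true
      · simp only [pvFsm, hdash, if_false, halnum, if_true, List.map_cons]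
        rw [ih false hddt hut hst (by simp)]
        simp [pvF, halnum]
      · simp only [pvFsm, hdash, if_false, halnum, List.map_cons]
        rw [ih false hddt hut hst (by simp)]
        simp [pvF, halnum]

-- the whole while-loop followed by the map pass equals the FSM
theorem pvMain (s : String) (hu : '_' ∉ s.toList) (hs : ' ' ∉ s.toList) :
    (pvNormLoop s).toList.map pvF = pvFsm s.toList false := by
  induction s using pvNormLoop.induct with
  | case1 s h ih =>
    rw [pvNormLoop, dif_pos h]
    rw [ih (fun hm => hu (pvMem_repl2 _ _ (pvStr_replace_dd_toList s ▸ hm)))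
          (fun hm => hs (pvMem_repl2 _ _ (pvStr_replace_dd_toList s ▸ hm)))]
    rw [pvStr_replace_dd_toList, pvFsm_repl2]
  | case2 s h =>
    rw [pvNormLoop, dif_neg h]
    have hdd : pvHasDD s.toList = false := by
      rw [← pvStr_isIn_dd]; simpa using h
    exact (pvFsm_no_dd s.toList false hdd hu hs (by simp)).symm

-- the FSM ignores the pre-substitution of '_' and ' ' by '-'
theorem pvFsm_repl1 (l : List Char) : ∀ prev, pvFsm (l.map pvR) prev = pvFsm l prev := by
  induction l with
  | nil => intro prev; simp [pvFsm]
  | cons c t ih =>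
    intro prev
    by_cases hdash : c = '_' ∨ c = ' ' ∨ c = '-'
    · have : pvR c = '-' := by
        rcases hdash with h | h | h <;> subst h <;> decide
      simp only [List.map_cons, this]
      simp [pvFsm, hdash, ih]
    · push_neg at hdash
      obtain ⟨h1, h2, h3⟩ := hdash
      have : pvR c = c := by simp [pvR, h1, h2]
      simp only [List.map_cons, this]
      by_cases halnum : PySem.Chars.isalnum c = true
      · simp [pvFsm, h1, h2, h3, halnum, ih]
      · simp [pvFsm, h1, h2, h3, halnum, ih]

theorem pvR_mem (c : Char) : pvR c ≠ '_' ∧ pvR c ≠ ' ' := by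
  by_cases h1 : c = '_'
  · subst h1; exact ⟨by decide, by decide⟩
  · by_cases h2 : c = ' '
    · subst h2; exact ⟨by decide, by decide⟩
    · have : pvR c = c := by simp [pvR, h1, h2]
      rw [this]; exact ⟨h1, h2⟩

-- ===== VERDICT (by name: the statement is the Claim_ definition above) =====
theorem project_env_key_py_spec : Claim_equal_project_env_key_py := by
  intro s _
  unfold Spec_project_env_key_py project_env_key_py project_env_key_py_alt
  rw [← String.toList_inj]
  rw [PySem.Str.toList_join, String.toList_ofList]
  rw [List.map_map]
  have hmap : (String.toList ∘ fun char =>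
      if PySem.Chars.isalnum char then String.ofList [PySem.Chars.upperChar char] else "_")
      = fun c => [pvF c] := by
    funext c
    by_cases h : PySem.Chars.isalnum c = true <;> simp [pvF, h]
  rw [hmap]
  -- the double replace is the single map pvR
  have hR : (PySem.Str.replace
      (PySem.Str.replace (PySem.Str.lower (PySem.Str.strip s)) "_" "-") " " "-").toList
      = (PySem.Str.lower (PySem.Str.strip s)).toList.map pvR := by
    rw [PySem.Str.toList_replace, PySem.Str.toList_replace]
    rw [show (" " : String).toList = [' '] from rfl, show ("_" : String).toList = ['_'] from rfl,
        show ("-" : String).toList = ['-'] from rfl]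
    rw [pvChars_replace_single, pvChars_replace_single, List.map_map]
    rfl
  have hu : '_' ∉ (PySem.Str.replace
      (PySem.Str.replace (PySem.Str.lower (PySem.Str.strip s)) "_" "-") " " "-").toList := by
    rw [hR]
    intro hm
    obtain ⟨c, _, hc⟩ := List.mem_map.mp hm
    exact (pvR_mem c).1 hc
  have hs' : ' ' ∉ (PySem.Str.replace
      (PySem.Str.replace (PySem.Str.lower (PySem.Str.strip s)) "_" "-") " " "-").toList := by
    rw [hR]
    intro hm
    obtain ⟨c, _, hc⟩ := List.mem_map.mp hm
    exact (pvR_mem c).2 hc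
  have := pvMain _ hu hs'
  rw [hR] at this
  rw [show (fun c => [pvF c]) = (fun x : Char => [x]) ∘ pvF from rfl, ← List.map_map]
  rw [PySem.Chars.join_nil_singletons]
  rw [this, pvFsm_repl1, String.toList_ofList]
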